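-- pv_equiv track=rewrite | github.com/theknoxinator/AoC | Python/2015/day20.py | find_house2
-- ===== SOURCE A (Python) =====
-- def find_house2(values):
--     target = int(values[0])
--
--     all_houses = [0] * (target // 10)
--
--     # Populate the presents for each house
--     for elf in range(1, target // 10):
--         for steps in range(50):
--             house = elf * (steps + 1)
--             if house >= len(all_houses):
--                 break
--             all_houses[house] += elf * 11
--
--     for house, total in enumerate(all_houses):
--         if total >= target:
--             return house
-- ===== SOURCE B (Python) =====
-- def find_house2(values):
--     target = int(values[0])
--     length = target // 10
--     for house in range(length):
--         total = 0
--         for q in range(1, 51):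
--             if house % q == 0:
--                 e = house // q
--                 if 1 <= e <= length - 1:
--                     total += e * 11
--         if total >= target:
--             return house
--     return None
-- ===== Notes on version B (the rewrite author's own statement) =====
-- stated objective: alternative
-- what changed: Replaced the elf-sieve scatter over a shared presents array by an independent per-house divisor gather (sum over step counts q=1..50 dividing the house), returning the first house whose gathered total reaches the target; no array is allocated.
import Mathlib
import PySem

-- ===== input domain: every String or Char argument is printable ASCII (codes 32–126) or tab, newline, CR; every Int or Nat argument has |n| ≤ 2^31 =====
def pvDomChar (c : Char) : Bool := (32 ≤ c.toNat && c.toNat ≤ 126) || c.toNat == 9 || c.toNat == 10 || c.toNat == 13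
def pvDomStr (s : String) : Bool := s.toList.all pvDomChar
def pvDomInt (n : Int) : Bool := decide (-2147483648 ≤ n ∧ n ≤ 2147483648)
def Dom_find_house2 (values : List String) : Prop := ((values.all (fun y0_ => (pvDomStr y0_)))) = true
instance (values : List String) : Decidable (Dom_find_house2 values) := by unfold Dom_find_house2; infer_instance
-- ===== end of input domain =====

-- B replaces A's elf-sieve scatter into a shared array by an independent per-house divisor
-- gather; same return value, no speed claim.

-- ===== PORT A =====
-- inner 'for steps in range(50): ... break' loop; indices are Nats since elf ≥ 1 and
-- house = elf*(steps+1) ≥ 0, so Nat indexing is exact here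
def pvInnerA (elf L : Nat) (steps : Nat) (acc : List Int) : List Int :=
  if steps < 50 then
    let house := elf * (steps + 1)
    if house ≥ L then acc
    else pvInnerA elf L (steps + 1) (acc.set house (acc.getD house 0 + (elf : Int) * 11))
  else acc
termination_by 50 - steps

-- 'for house, total in enumerate(all_houses): if total >= target: return house' —
-- enumerate ported as a walk carrying the index counter
def pvScanA (target : Int) (house : Nat) : List Int → Option Int
  | [] => none
  | total :: rest => if total ≥ target then some (house : Int) else pvScanA target (house + 1) rest

def find_house2 (values : List String) : Option Int :=
  match PySem.List.pyGet? values 0 with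
  | none => none   -- IndexError: excluded by Pre_
  | some s =>
    match PySem.Int.ofStr? s with
    | none => none -- ValueError: excluded by Pre_
    | some target =>
      -- len(all_houses) = target // 10 (empty when target // 10 ≤ 0, exactly like [0]*n)
      let L : Nat := (PySem.Int.floordiv target 10).toNat
      let allHouses :=
        (List.range' 1 (L - 1)).foldl (fun acc elf => pvInnerA elf L 0 acc)
          (List.replicate L (0 : Int))
      pvScanA target 0 allHouses

-- ===== PORT B =====
-- total for one house: sum of e*11 over q in range(1,51) with house % q == 0 and 1 ≤ e ≤ length-1
-- (the loop only runs for house < L, so L ≥ 1 and Nat's L-1 equals Python's length-1)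
def pvTotalB (L h : Nat) : Int :=
  (List.range' 1 50).foldl
    (fun total q =>
      if h % q = 0 then
        let e := h / q
        if 1 ≤ e ∧ e ≤ L - 1 then total + (e : Int) * 11 else total
      else total) 0

def pvLoopB (target : Int) (L : Nat) (h : Nat) : Option Int :=
  if h < L then
    (if pvTotalB L h ≥ target then some (h : Int) else pvLoopB target L (h + 1))
  else none
termination_by L - h

def find_house2_alt (values : List String) : Option Int :=
  match PySem.List.pyGet? values 0 with
  | none => none
  | some s =>
    match PySem.Int.ofStr? s with
    | none => none
    | some target =>
      let L : Nat := (PySem.Int.floordiv target 10).toNat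
      pvLoopB target L 0

-- ===== PRECONDITION & SPEC =====
-- Pre_ excludes exactly the inputs where Python A raises: an empty list (IndexError) or a
-- first element int() rejects (ValueError)
def Pre_find_house2 (values : List String) : Prop :=
  values ≠ [] ∧ (PySem.Int.ofStr? (values.headD "")).isSome = true
instance (values : List String) : Decidable (Pre_find_house2 values) := by
  unfold Pre_find_house2; infer_instance

def pvWitness_find_house2 : List String := (["120"])

def Spec_find_house2 (values : List String) (out : Option Int) : Prop := out = find_house2_alt values
instance (values : List String) (out : Option Int) : Decidable (Spec_find_house2 values out) := by
  unfold Spec_find_house2; infer_instance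

-- ===== CLAIM (what is proved, stated in full; the proofs are below) =====
def Claim_equal_find_house2 : Prop := ∀ (values : List String), Dom_find_house2 values → Pre_find_house2 values → Spec_find_house2 values (find_house2 values)

-- ===== LEMMAS AND PROOFS =====

-- the per-elf contribution that the sieve deposits at house h
def pvContrib (elf h : Nat) : Int :=
  if elf ∣ h ∧ 0 < h / elf ∧ h / elf ≤ 50 then (elf : Int) * 11 else 0

-- B's per-house total, as a sum over the step counts q
def pvGTerm (L h q : Nat) : Int :=
  if h % q = 0 ∧ 1 ≤ h / q ∧ h / q ≤ L - 1 then ((h / q : Nat) : Int) * 11 else 0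

theorem pvInnerA_length (elf L steps : Nat) (acc : List Int) :
    (pvInnerA elf L steps acc).length = acc.length := by
  induction steps, acc using pvInnerA.induct elf L with
  | case1 steps acc h1 house h2 => rw [pvInnerA]; simp [h1, house, h2]
  | case2 steps acc h1 house h2 ih =>
      rw [pvInnerA]; simp only [h1, if_true, house, h2, if_false]
      simpa using ih
  | case3 steps acc h1 => rw [pvInnerA]; simp [h1]

theorem pvInnerA_getD (elf L : Nat) (helf : 1 ≤ elf) (steps : Nat) (acc : List Int) (h : Nat)
    (hh : h < L) :
    acc.length = L →
    (pvInnerA elf L steps acc).getD h 0 =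
      acc.getD h 0 + (if elf ∣ h ∧ steps < h / elf ∧ h / elf ≤ 50 then (elf : Int) * 11 else 0) := by
  induction steps, acc using pvInnerA.induct elf L with
  | case1 steps acc h1 house h2 =>
      intro hlen
      rw [pvInnerA]
      simp only [h1, house, h2, if_pos]
      rw [if_neg, add_zero]
      rintro ⟨hdvd, hgt, hle⟩
      have h3 : h = elf * (h / elf) := (Nat.mul_div_cancel' hdvd).symm
      have h4 : elf * (steps + 1) ≤ elf * (h / elf) := Nat.mul_le_mul_left _ (by omega)
      have h5 : L ≤ elf * (steps + 1) := h2
      omega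
  | case2 steps acc h1 house h2 ih =>
      intro hlen
      have hhouse : house < acc.length := by
        have : ¬ (elf * (steps + 1) ≥ L) := h2
        omega
      rw [pvInnerA]
      simp only [h1, if_true]
      rw [if_neg h2, ih (by simp [hlen])]
      by_cases hhe : house = h
      · have hmul : elf * (steps + 1) = h := hhe
        have hdvd : elf ∣ h := ⟨steps + 1, hmul.symm⟩
        have hq : h / elf = steps + 1 := by
          rw [← hmul, Nat.mul_div_cancel_left _ (by omega : 0 < elf)]
        have hset : (acc.set house (acc.getD house 0 + (elf : Int) * 11)).getD h 0 =
            acc.getD h 0 + (elf : Int) * 11 := by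
          rw [List.getD_eq_getElem?_getD, List.getElem?_set, if_pos hhe, if_pos (hhe ▸ hhouse)]
          rw [Option.getD_some, hhe, List.getD_eq_getElem?_getD]
        rw [hset, if_neg (by rintro ⟨_, hlt, _⟩; omega),
            if_pos ⟨hdvd, by omega, by omega⟩]
        ring
      · have hset : (acc.set house (acc.getD house 0 + (elf : Int) * 11)).getD h 0 =
            acc.getD h 0 := by
          rw [List.getD_eq_getElem?_getD, List.getElem?_set, if_neg hhe,
              ← List.getD_eq_getElem?_getD]
        rw [hset]
        congr 2
        apply propext
        constructor
        · rintro ⟨hdvd, hgt, hle⟩; exact ⟨hdvd, by omega, hle⟩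
        · rintro ⟨hdvd, hgt, hle⟩
          refine ⟨hdvd, ?_, hle⟩
          rcases Nat.eq_or_lt_of_le hgt with heq | hlt2
          · exfalso; exact hhe (by
              show elf * (steps + 1) = h
              rw [show steps + 1 = h / elf from heq]; exact Nat.mul_div_cancel' hdvd)
          · omega
  | case3 steps acc h1 =>
      intro hlen
      rw [pvInnerA]
      simp only [h1, if_false]
      rw [if_neg, add_zero]
      rintro ⟨_, hgt, hle⟩; omega

theorem pvFold_getD (L : Nat) (es : List Nat) (acc : List Int) (h : Nat)
    (hes : ∀ e ∈ es, 1 ≤ e) (hlen : acc.length = L) (hh : h < L) :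
    (es.foldl (fun acc elf => pvInnerA elf L 0 acc) acc).getD h 0 =
      acc.getD h 0 + (es.map (fun e => pvContrib e h)).sum := by
  induction es generalizing acc with
  | nil => simp
  | cons e es ih =>
      simp only [List.foldl_cons, List.map_cons, List.sum_cons]
      rw [ih (pvInnerA e L 0 acc) (fun x hx => hes x (List.mem_cons_of_mem _ hx))
          (by rw [pvInnerA_length, hlen])]
      rw [pvInnerA_getD e L (hes e (List.mem_cons_self)) 0 acc h hh hlen]
      unfold pvContrib
      ring

theorem pvTotalB_sum (L h : Nat) :
    pvTotalB L h = ((List.range' 1 50).map (pvGTerm L h)).sum := by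
  unfold pvTotalB
  rw [show (fun (total : Int) (q : Nat) =>
      if h % q = 0 then
        let e := h / q
        if 1 ≤ e ∧ e ≤ L - 1 then total + (e : Int) * 11 else total
      else total) = fun total q => total + pvGTerm L h q from by
    funext total q
    simp only [pvGTerm]
    split_ifs with h1 h2 h3 h3 <;> simp_all]
  rw [PySem.List.foldl_add]
  simp

theorem pvSum_swap (L h : Nat) (hh : h < L) :
    ((List.range' 1 (L - 1)).map (fun e => pvContrib e h)).sum =
      ((List.range' 1 50).map (pvGTerm L h)).sum := by
  have e1 : ((List.range' 1 (L - 1)).map (fun e => pvContrib e h)).sum =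
      ∑ e ∈ Finset.Ico 1 (L - 1 + 1), pvContrib e h := rfl
  have e2 : ((List.range' 1 50).map (pvGTerm L h)).sum =
      ∑ q ∈ Finset.Ico 1 51, pvGTerm L h q := rfl
  rw [e1, e2, show L - 1 + 1 = L from by omega]
  unfold pvContrib pvGTerm
  rw [← Finset.sum_filter, ← Finset.sum_filter]
  refine Finset.sum_nbij' (fun e => h / e) (fun q => h / q) ?_ ?_ ?_ ?_ ?_
  · intro e he
    simp only [Finset.mem_filter, Finset.mem_Ico] at he ⊢
    obtain ⟨⟨he1, he2⟩, hdvd, hgt, hle⟩ := he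
    have hne : h ≠ 0 := by rintro rfl; simp at hgt
    have hdd : h / (h / e) = e := Nat.div_div_self hdvd hne
    refine ⟨⟨by omega, by omega⟩, ?_, ?_, ?_⟩
    · exact Nat.dvd_iff_mod_eq_zero.mp (Nat.div_dvd_of_dvd hdvd)
    · rw [hdd]; omega
    · rw [hdd]; omega
  · intro q hq
    simp only [Finset.mem_filter, Finset.mem_Ico] at hq ⊢
    obtain ⟨⟨hq1, hq2⟩, hmod, hge, hle⟩ := hq
    have hdvd : q ∣ h := Nat.dvd_iff_mod_eq_zero.mpr hmod
    have hne : h ≠ 0 := by rintro rfl; simp at hge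
    have hdd : h / (h / q) = q := Nat.div_div_self hdvd hne
    exact ⟨⟨by omega, by omega⟩, Nat.div_dvd_of_dvd hdvd, by rw [hdd]; omega, by rw [hdd]; omega⟩
  · intro e he
    simp only [Finset.mem_filter, Finset.mem_Ico] at he
    obtain ⟨⟨he1, he2⟩, hdvd, hgt, hle⟩ := he
    have hne : h ≠ 0 := by rintro rfl; simp at hgt
    exact Nat.div_div_self hdvd hne
  · intro q hq
    simp only [Finset.mem_filter, Finset.mem_Ico] at hq
    obtain ⟨⟨hq1, hq2⟩, hmod, hge, hle⟩ := hq
    have hdvd : q ∣ h := Nat.dvd_iff_mod_eq_zero.mpr hmod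
    have hne : h ≠ 0 := by rintro rfl; simp at hge
    exact Nat.div_div_self hdvd hne
  · intro e he
    simp only [Finset.mem_filter, Finset.mem_Ico] at he
    obtain ⟨⟨he1, he2⟩, hdvd, hgt, hle⟩ := he
    have hne : h ≠ 0 := by rintro rfl; simp at hgt
    rw [Nat.div_div_self hdvd hne]

theorem pvScan_eq_loop (target : Int) (L : Nat) (arr : List Int) (k : Nat)
    (hlen : k + arr.length = L)
    (hval : ∀ j, j < arr.length → arr.getD j 0 = pvTotalB L (k + j)) :
    pvScanA target k arr = pvLoopB target L k := by
  induction arr generalizing k with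
  | nil =>
      rw [pvLoopB, pvScanA]
      simp at hlen
      rw [if_neg (by omega)]
  | cons t rest ih =>
      rw [pvLoopB, pvScanA]
      have hk : k < L := by simp at hlen; omega
      rw [if_pos hk]
      have ht : t = pvTotalB L k := by
        have := hval 0 (by simp)
        simpa using this
      rw [← ht]
      by_cases hge : t ≥ target
      · rw [if_pos hge, if_pos hge]
      · rw [if_neg hge, if_neg hge]
        apply ih
        · simp at hlen ⊢; omega
        · intro j hj
          have := hval (j + 1) (by simpa using Nat.succ_lt_succ hj)
          simpa [Nat.add_assoc, Nat.add_comm 1 j] using this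

theorem pvFold_length (L : Nat) (es : List Nat) (acc : List Int) :
    (es.foldl (fun acc elf => pvInnerA elf L 0 acc) acc).length = acc.length := by
  induction es generalizing acc with
  | nil => rfl
  | cons e es ih => simp only [List.foldl_cons]; rw [ih, pvInnerA_length]

theorem pvReplicate_getD (L h : Nat) : (List.replicate L (0 : Int)).getD h 0 = 0 := by
  rw [List.getD_eq_getElem?_getD, List.getElem?_replicate]
  split_ifs <;> simp

theorem find_house2_spec' (values : List String) (hpre : Pre_find_house2 values) :
    find_house2 values = find_house2_alt values := by
  obtain ⟨hne, hsome⟩ := hpre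
  unfold find_house2 find_house2_alt
  match values with
  | [] => exact absurd rfl hne
  | s :: vs =>
      simp only [PySem.List.pyGet?_zero_cons]
      match hos : PySem.Int.ofStr? s with
      | none => simp [hos] at hsome
      | some target =>
        simp only
        apply pvScan_eq_loop
        · rw [Nat.zero_add, pvFold_length, List.length_replicate]
        · intro j hj
          rw [pvFold_length, List.length_replicate] at hj
          rw [pvFold_getD ((PySem.Int.floordiv target 10).toNat)
              (List.range' 1 ((PySem.Int.floordiv target 10).toNat - 1))
              (List.replicate ((PySem.Int.floordiv target 10).toNat) (0 : Int)) j
              (fun x hx => (List.mem_range'_1.mp hx).1) (List.length_replicate) hj]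
          rw [pvReplicate_getD, zero_add, pvSum_swap _ j hj, ← pvTotalB_sum, Nat.zero_add]

-- ===== VERDICT (by name: the statement is the Claim_ definition above) =====
theorem find_house2_spec : Claim_equal_find_house2 := by
  intro values _ hpre
  exact find_house2_spec' values hpre
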